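-- pv_equiv track=rewrite | github.com/anguillanneuf/bigO | 109 binary_search_index_num.py | index_equals_value_search
-- ===== SOURCE A (Python) =====
-- def index_equals_value_search(arr):
--   left = 0
--   right = len(arr) - 1
--   result = -1
--
--   while left < right:
--
--     mid = (right+left)//2
--
--     if arr[mid] == mid:
--       result = mid
--       right = mid-1
--
--     if arr[mid] < mid:
--       left = mid+1
--
--     if arr[mid] >= mid:
--       right = mid-1
--
--   return result
-- ===== SOURCE B (Python) =====
-- def index_equals_value_search(arr):
--   def rec(left, right, result):
--     if left >= right:
--       return result
--     mid = (left + right) // 2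
--     if arr[mid] < mid:
--       return rec(mid + 1, right, result)
--     elif arr[mid] == mid:
--       return rec(left, mid - 1, mid)
--     else:
--       return rec(left, mid - 1, result)
--   return rec(0, len(arr) - 1, -1)
-- ===== Notes on version B (the rewrite author's own statement) =====
-- stated objective: alternative
-- what changed: The iterative while-loop with three sequential in-place if-updates is recast as a recursive divide-and-conquer helper rec(left, right, result) with three mutually exclusive branches and an accumulator, preserving the original strict left < right termination test.
import Mathlib
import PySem

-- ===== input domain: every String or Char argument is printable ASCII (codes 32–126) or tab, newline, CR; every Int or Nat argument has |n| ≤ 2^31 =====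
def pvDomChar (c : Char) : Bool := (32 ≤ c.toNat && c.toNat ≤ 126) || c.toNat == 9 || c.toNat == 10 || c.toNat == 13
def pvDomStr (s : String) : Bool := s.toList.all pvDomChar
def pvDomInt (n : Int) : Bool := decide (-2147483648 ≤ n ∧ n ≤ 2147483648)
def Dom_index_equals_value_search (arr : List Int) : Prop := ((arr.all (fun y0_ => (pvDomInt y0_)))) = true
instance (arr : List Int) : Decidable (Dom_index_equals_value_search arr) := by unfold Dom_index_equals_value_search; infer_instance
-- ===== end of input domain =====

-- ===== PORT A =====
-- B recasts A's while-loop as divide-and-conquer recursion with an accumulator; return values proved equal on all inputs.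
-- Literal port of A's while-loop: state (left, right, result), three sequential ifs.
def pvLoopA (arr : List Int) (left right result : Int) : Int :=
  if h : left < right then
    let mid := PySem.Int.floordiv (right + left) 2
    let v := (PySem.List.pyGet? arr mid).getD 0
    let result1 := if v = mid then mid else result
    let right1 := if v = mid then mid - 1 else right
    let left1 := if v < mid then mid + 1 else left
    let right2 := if v ≥ mid then mid - 1 else right1
    pvLoopA arr left1 right2 result1
  else result
termination_by (right - left).toNat
decreasing_by
  have hm := PySem.Int.floordiv_two_mid_bounds (show left ≤ right by omega)
  rw [show left + right = right + left by omega] at hm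
  split_ifs <;> omega

def index_equals_value_search (arr : List Int) : Int :=
  pvLoopA arr 0 ((arr.length : Int) - 1) (-1)

-- ===== PORT B =====
-- Literal port of B's recursive helper rec(left, right, result).
def pvRecB (arr : List Int) (left right result : Int) : Int :=
  if left ≥ right then result
  else
    let mid := PySem.Int.floordiv (left + right) 2
    let v := (PySem.List.pyGet? arr mid).getD 0
    if v < mid then pvRecB arr (mid + 1) right result
    else if v = mid then pvRecB arr left (mid - 1) mid
    else pvRecB arr left (mid - 1) result
termination_by (right - left).toNat
decreasing_by
  all_goals
    have hm := PySem.Int.floordiv_two_mid_bounds (show left ≤ right by omega)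
    omega

def index_equals_value_search_alt (arr : List Int) : Int :=
  pvRecB arr 0 ((arr.length : Int) - 1) (-1)

-- ===== PRECONDITION & SPEC =====
def Spec_index_equals_value_search (arr : List Int) (out : Int) : Prop := out = index_equals_value_search_alt arr
instance (arr : List Int) (out : Int) : Decidable (Spec_index_equals_value_search arr out) := by unfold Spec_index_equals_value_search; infer_instance

-- ===== CLAIM (what is proved, stated in full; the proofs are below) =====
def Claim_equal_index_equals_value_search : Prop := ∀ (arr : List Int), Dom_index_equals_value_search arr → Spec_index_equals_value_search arr (index_equals_value_search arr)

-- ===== LEMMAS AND PROOFS =====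
theorem pvLoopA_eq_pvRecB (arr : List Int) : ∀ (n : Nat) (left right result : Int),
    (right - left).toNat ≤ n → pvLoopA arr left right result = pvRecB arr left right result := by
  intro n
  induction n with
  | zero =>
    intro left right result h
    rw [pvLoopA, pvRecB, dif_neg (by omega), if_pos (by omega)]
  | succ m ih =>
    intro left right result h
    by_cases hlr : left < right
    · rw [pvLoopA, pvRecB, dif_pos hlr, if_neg (by omega)]
      have hm := PySem.Int.floordiv_two_mid_bounds (show left ≤ right by omega)
      rw [show right + left = left + right by omega]
      simp only []
      set mid := PySem.Int.floordiv (left + right) 2 with hmid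
      set v := (PySem.List.pyGet? arr mid).getD 0 with hv
      by_cases h1 : v < mid
      · simp only [if_neg (show ¬ v = mid by omega), if_pos h1,
          if_neg (show ¬ v ≥ mid by omega)]
        exact ih _ _ _ (by omega)
      · by_cases h2 : v = mid
        · simp only [if_pos h2, if_neg h1, if_pos (show v ≥ mid by omega)]
          exact ih _ _ _ (by omega)
        · simp only [if_neg h2, if_neg h1, if_pos (show v ≥ mid by omega)]
          exact ih _ _ _ (by omega)
    · rw [pvLoopA, pvRecB, dif_neg hlr, if_pos (by omega)]

-- ===== VERDICT (by name: the statement is the Claim_ definition above) =====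
theorem index_equals_value_search_spec : Claim_equal_index_equals_value_search := by
  intro arr _
  unfold Spec_index_equals_value_search index_equals_value_search index_equals_value_search_alt
  exact pvLoopA_eq_pvRecB arr _ 0 ((arr.length : Int) - 1) (-1) le_rfl
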